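-- pv_equiv track=rewrite | github.com/reglab/cal-ff | cacafo/reports.py | _remove_duplicate_entries
-- ===== SOURCE A (Python) =====
-- def _invert_dict_of_sets(dos):
--     sod = {}
--     for k, v in dos.items():
--         for i in v:
--             sod[i] = sod.get(i, set()) | {k}
--     return sod
--
-- def _remove_duplicate_entries(dos):
--     """In a dict of sets, remove any set entries that are in another set entry"""
--     sod = _invert_dict_of_sets(dos)
--     dos_output = {}
--     for s, d_set in sod.items():
--         if len(d_set) == 1:
--             d = d_set.pop()
--             dos_output[d] = dos_output.get(d, set()) | {s}
--     return dos_output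
-- ===== SOURCE B (Python) =====
-- def _remove_duplicate_entries(dos):
--     """In a dict of sets, remove any set entries that are in another set entry"""
--     seen = set()
--     shared = set()
--     for v in dos.values():
--         for i in v:
--             if i in seen:
--                 shared.add(i)
--             else:
--                 seen.add(i)
--     out = {}
--     for k, v in dos.items():
--         kept = [i for i in v if i not in shared]
--         if kept:
--             out[k] = set(kept)
--     return out
-- ===== Notes on version B (the rewrite author's own statement) =====
-- stated objective: faster
-- what changed: B never builds A's inverted element->set-of-owners map: a first pass marks elements seen twice into a 'shared' set, and a second pass filters each ORIGINAL dict entry down to its unshared elements, keeping keys whose filtered set is nonempty.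
-- outside the precondition, e.g. on _remove_duplicate_entries({1: [2, 2]}): A returns {1: {2}}, B returns {}
import Mathlib
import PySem

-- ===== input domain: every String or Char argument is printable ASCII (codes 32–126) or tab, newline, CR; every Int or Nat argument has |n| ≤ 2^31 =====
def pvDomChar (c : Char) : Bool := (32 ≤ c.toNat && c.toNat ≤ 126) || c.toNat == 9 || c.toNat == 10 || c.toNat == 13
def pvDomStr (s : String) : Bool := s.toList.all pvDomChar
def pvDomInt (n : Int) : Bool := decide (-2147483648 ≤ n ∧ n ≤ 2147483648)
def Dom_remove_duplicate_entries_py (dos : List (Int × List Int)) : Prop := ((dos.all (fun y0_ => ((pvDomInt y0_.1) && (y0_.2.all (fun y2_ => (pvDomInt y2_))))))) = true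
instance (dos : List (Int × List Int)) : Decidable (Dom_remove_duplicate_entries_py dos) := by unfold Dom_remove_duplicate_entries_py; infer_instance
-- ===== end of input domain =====

-- B never builds A's inverted element->set-of-owners map: it marks twice-seen elements into a
-- 'shared' set and then filters each ORIGINAL dict entry; objective: faster (no per-element set-union copies).

-- ===== PORT A =====
-- port of _invert_dict_of_sets
def pvInvertDictOfSets (dos : List (Int × List Int)) : PySem.Dict Int (PySem.Set Int) :=
  dos.foldl (fun sod kv =>
    kv.2.foldl (fun sod i =>
      sod.insert i (PySem.Set.union (sod.getD i PySem.Set.empty) (PySem.Set.ofList [kv.1]))) sod)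
    PySem.Dict.empty

def remove_duplicate_entries_py (dos : List (Int × List Int)) : List (Int × List Int) :=
  let sod := pvInvertDictOfSets dos
  (sod.items.foldl (fun out p =>
    if PySem.Set.len p.2 == 1 then
      -- d = d_set.pop(): the set has exactly one element here, so the pop yields that element
      let d := p.2.headD 0
      out.insert d (PySem.Set.union (out.getD d PySem.Set.empty) (PySem.Set.ofList [p.1]))
    else out) (PySem.Dict.empty : PySem.Dict Int (PySem.Set Int))).items

-- ===== PORT B =====
def remove_duplicate_entries_py_alt (dos : List (Int × List Int)) : List (Int × List Int) :=
  let ss := dos.foldl (fun (ss : PySem.Set Int × PySem.Set Int) kv =>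
    kv.2.foldl (fun ss i =>
      if PySem.Set.contains ss.1 i then (ss.1, PySem.Set.add ss.2 i)
      else (PySem.Set.add ss.1 i, ss.2)) ss) (PySem.Set.empty, PySem.Set.empty)
  (dos.foldl (fun (out : PySem.Dict Int (PySem.Set Int)) kv =>
    let kept := kv.2.filter (fun i => !(PySem.Set.contains ss.2 i))
    if kept.isEmpty then out else out.insert kv.1 (PySem.Set.ofList kept))
    PySem.Dict.empty).items

-- ===== PRECONDITION & SPEC =====
-- Pre_ excludes association lists with duplicate dict keys or duplicate elements inside a value
-- list: those are not valid List-encodings of a Python dict-of-sets input (dict keys and set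
-- elements are distinct), so neither program's value there represents anything.
def Pre_remove_duplicate_entries_py (dos : List (Int × List Int)) : Prop :=
  (dos.map Prod.fst).Nodup ∧ ∀ p ∈ dos, p.2.Nodup
instance (dos : List (Int × List Int)) : Decidable (Pre_remove_duplicate_entries_py dos) := by
  unfold Pre_remove_duplicate_entries_py; infer_instance

def pvWitness_remove_duplicate_entries_py : (List (Int × List Int)) := [(1, [2, 3]), (4, [3, 5])]

def Spec_remove_duplicate_entries_py (dos : List (Int × List Int)) (out : List (Int × List Int)) : Prop :=
  out = remove_duplicate_entries_py_alt dos
instance (dos : List (Int × List Int)) (out : List (Int × List Int)) : Decidable (Spec_remove_duplicate_entries_py dos out) := by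
  unfold Spec_remove_duplicate_entries_py; infer_instance

-- ===== CLAIM =====
def Claim_equal_remove_duplicate_entries_py : Prop :=
  ∀ (dos : List (Int × List Int)), Dom_remove_duplicate_entries_py dos →
    Pre_remove_duplicate_entries_py dos →
    Spec_remove_duplicate_entries_py dos (remove_duplicate_entries_py dos)

-- ===== LEMMAS AND PROOFS =====

-- the flattened (key, element) stream both phase-1 loops traverse
def pvPairs (dos : List (Int × List Int)) : List (Int × Int) :=
  dos.flatMap (fun kv => kv.2.map (fun i => (kv.1, i)))

-- pvU dos i: element i occurs exactly once in the whole stream (under Pre_, "i is in exactly one set")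
def pvU (dos : List (Int × List Int)) (i : Int) : Bool :=
  ((pvPairs dos).map Prod.snd).count i == 1

-- the stream restricted to its unique elements
def pvQ (dos : List (Int × List Int)) : List (Int × Int) :=
  (pvPairs dos).filter (fun p => pvU dos p.2)

lemma pvFoldFlat {σ : Type} (l : List (Int × List Int)) (f : σ → Int → Int → σ) (s : σ) :
    l.foldl (fun s kv => kv.2.foldl (fun s i => f s kv.1 i) s) s
      = (pvPairs l).foldl (fun s p => f s p.1 p.2) s := by
  induction l generalizing s with
  | nil => rfl
  | cons kv t ih =>
    simp only [pvPairs, List.flatMap_cons, List.foldl_append, List.foldl_cons, List.foldl_map]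
    rw [ih]; rfl

lemma pvFst_mem_pairs (l : List (Int × List Int)) (q : Int × Int) (hq : q ∈ pvPairs l) :
    q.1 ∈ l.map Prod.fst := by
  simp only [pvPairs, List.mem_flatMap, List.mem_map] at hq
  rcases hq with ⟨kv, hkv, i, hi, rfl⟩
  exact List.mem_map.2 ⟨kv, hkv, rfl⟩

lemma pvPairs_pairwise (dos : List (Int × List Int))
    (h1 : (dos.map Prod.fst).Nodup) (h2 : ∀ p ∈ dos, p.2.Nodup) :
    (pvPairs dos).Pairwise (fun a b => a.2 = b.2 → a.1 ≠ b.1) := by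
  induction dos with
  | nil => simp [pvPairs]
  | cons kv t ih =>
    have h1' := h1
    simp only [List.map_cons, List.nodup_cons] at h1'
    simp only [pvPairs, List.flatMap_cons]
    rw [List.pairwise_append]
    refine ⟨?_, ih h1'.2 (fun p hp => h2 p (List.mem_cons_of_mem _ hp)), ?_⟩
    · have hnd : kv.2.Nodup := h2 kv (List.mem_cons_self)
      exact List.Pairwise.map _ (fun a b hab h2eq => absurd h2eq hab) hnd
    · intro a ha b hb _
      obtain ⟨i, _, rfl⟩ := List.mem_map.1 ha
      intro hfst
      exact h1'.1 (hfst ▸ pvFst_mem_pairs t b hb)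

-- a fold of "insert key (add (getD key) val)" is a fold of "modify key (· ++ [val])"
-- when no (key, val) pair is ever added twice
lemma pvAddFold_eq_modifyFold (qs : List (Int × Int)) (out : PySem.Dict Int (List Int))
    (hpw : qs.Pairwise (fun a b => a.1 = b.1 → a.2 ≠ b.2))
    (hout : ∀ p ∈ qs, p.2 ∉ out.getD p.1 []) :
    qs.foldl (fun out p => out.insert p.1 (PySem.Set.add (out.getD p.1 []) p.2)) out
      = qs.foldl (fun out p => out.modify p.1 [] (· ++ [p.2])) out := by
  induction qs generalizing out with
  | nil => rfl
  | cons p t ih =>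
    have hpw' := List.pairwise_cons.1 hpw
    have hstep : out.insert p.1 (PySem.Set.add (out.getD p.1 []) p.2)
        = out.modify p.1 [] (· ++ [p.2]) := by
      rw [PySem.Set.add_of_not_mem (hout p (List.mem_cons_self))]
      rfl
    simp only [List.foldl_cons, hstep]
    apply ih _ hpw'.2
    intro q hq
    rw [PySem.Dict.getD_modify]
    by_cases hqp : q.1 = p.1
    · rw [if_pos hqp]
      simp only [List.mem_append, List.mem_singleton]
      rintro (h | h)
      · exact hout q (List.mem_cons_of_mem _ hq) (hqp ▸ h)
      · exact hpw'.1 q hq hqp.symm h.symm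
    · rw [if_neg hqp]
      exact hout q (List.mem_cons_of_mem _ hq)

-- items of a "modify key (· ++ [val])" fold from the empty dict
lemma pvModifyFoldItems (qs : List (Int × Int)) :
    ((qs.foldl (fun d p => d.modify p.1 [] (· ++ [p.2])) (PySem.Dict.empty : PySem.Dict Int (List Int))).items)
      = (PySem.Set.ofList (qs.map Prod.fst)).map
          (fun k => (k, (qs.filter (fun p => p.1 == k)).map Prod.snd)) := by
  have hnd : ((qs.foldl (fun d p => d.modify p.1 [] (· ++ [p.2])) (PySem.Dict.empty : PySem.Dict Int (List Int))).keys).Nodup :=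
    PySem.Dict.nodup_keys_foldl_modify_key qs Prod.fst [] (fun d x => (· ++ [x.2])) PySem.Dict.empty PySem.Dict.nodup_keys_empty
  have hkeys : (qs.foldl (fun d p => d.modify p.1 [] (· ++ [p.2])) (PySem.Dict.empty : PySem.Dict Int (List Int))).keys
      = PySem.Set.ofList (qs.map Prod.fst) := by
    rw [PySem.Dict.keys_foldl_modify_key]
    simp [PySem.Dict.keys_empty, PySem.Set.update_nil_left]
  rw [PySem.Dict.items_eq_map_keys _ hnd [], hkeys]
  apply List.map_congr_left
  intro k hk
  rw [PySem.Dict.getD_foldl_modify_append]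
  simp [PySem.Dict.getD_empty]

-- deduplication is invisible on elements that occur at most once
lemma pvFD (l : List Int) (c : Int → Bool) (hc : ∀ x, c x = true → l.count x ≤ 1) :
    (PySem.Set.ofList l).filter c = l.filter c := by
  induction l with
  | nil => rfl
  | cons x t ih =>
    have hct : ∀ y, c y = true → t.count y ≤ 1 := by
      intro y hy
      have := hc y hy
      rw [List.count_cons] at this
      omega
    have hdis : PySem.Set.discard (PySem.Set.ofList t) x
        = (PySem.Set.ofList t).filter (fun y => !(y == x)) := rfl
    rw [PySem.Set.ofList_cons]
    by_cases hx : c x = true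
    · have hxt : x ∉ t := by
        have := hc x hx
        rw [List.count_cons_self] at this
        have : t.count x = 0 := by omega
        exact List.count_eq_zero.1 this
      have : PySem.Set.discard (PySem.Set.ofList t) x = PySem.Set.ofList t := by
        rw [hdis]
        apply List.filter_eq_self.2
        intro y hy
        have : y ∈ t := (PySem.Set.mem_ofList t y).1 hy
        simp only [Bool.not_eq_eq_eq_not, Bool.not_true, beq_eq_false_iff_ne, ne_eq]
        rintro rfl; exact hxt this
      simp only [List.filter_cons, hx, if_pos, this, ih hct]
    · have hx' : c x = false := by simpa using hx
      simp only [List.filter_cons, hx']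
      rw [hdis, List.filter_filter]
      have : ∀ y ∈ PySem.Set.ofList t, (c y && !(y == x)) = c y := by
        intro y _
        by_cases hy : c y = true
        · have : y ≠ x := by rintro rfl; rw [hy] at hx'; cases hx'
          simp [hy, this]
        · simp [Bool.eq_false_iff.2 hy]
      rw [List.filter_congr this, ih hct]

lemma pvQ_map_snd (dos : List (Int × List Int)) :
    (pvQ dos).map Prod.snd = ((pvPairs dos).map Prod.snd).filter (pvU dos) := by
  rw [List.filter_map]; rfl

lemma pvQ_snd_nodup (dos : List (Int × List Int)) : ((pvQ dos).map Prod.snd).Nodup := by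
  rw [pvQ_map_snd, List.nodup_iff_count]
  intro a
  by_cases h : pvU dos a = true
  · rw [List.count_filter h]
    have : ((pvPairs dos).map Prod.snd).count a = 1 := by simpa [pvU] using h
    omega
  · have : a ∉ ((pvPairs dos).map Prod.snd).filter (pvU dos) := by
      intro hmem
      exact h (List.of_mem_filter hmem)
    rw [List.count_eq_zero.2 this]
    omega

lemma pvOwnersSingleton (dos : List (Int × List Int)) (p : Int × Int) (hp : p ∈ pvQ dos) :
    ((pvPairs dos).filter (fun q => q.2 == p.2)).map Prod.fst = [p.1] := by
  obtain ⟨hmem, hu⟩ := List.mem_filter.1 hp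
  have hcnt : ((pvPairs dos).map Prod.snd).count p.2 = 1 := by
    simpa [pvU] using hu
  have hlen : ((pvPairs dos).filter (fun q => q.2 == p.2)).length = 1 := by
    rw [← List.countP_eq_length_filter]
    rw [List.count, List.countP_map] at hcnt
    exact hcnt
  obtain ⟨q0, hq0⟩ := List.length_eq_one_iff.1 hlen
  have hpf : p ∈ (pvPairs dos).filter (fun q => q.2 == p.2) :=
    List.mem_filter.2 ⟨hmem, by simp⟩
  rw [hq0] at hpf ⊢
  simp at hpf
  simp [hpf]

-- A computes the unique-element stream grouped by owner
lemma pvA_eq (dos : List (Int × List Int))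
    (h1 : (dos.map Prod.fst).Nodup) (h2 : ∀ p ∈ dos, p.2.Nodup) :
    remove_duplicate_entries_py dos
      = (PySem.Set.ofList ((pvQ dos).map Prod.fst)).map
          (fun d => (d, ((pvQ dos).filter (fun p => p.1 == d)).map Prod.snd)) := by
  -- phase 1: sod as a modify-fold over the swapped stream
  have hsod : pvInvertDictOfSets dos
      = ((pvPairs dos).map Prod.swap).foldl (fun d p => d.modify p.1 [] (· ++ [p.2])) PySem.Dict.empty := by
    unfold pvInvertDictOfSets
    rw [pvFoldFlat dos (fun sod k i =>
      sod.insert i (PySem.Set.union (sod.getD i PySem.Set.empty) (PySem.Set.ofList [k]))) PySem.Dict.empty]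
    rw [← pvAddFold_eq_modifyFold _ _
      (List.Pairwise.map Prod.swap (fun {a b} h hh => h hh) (pvPairs_pairwise dos h1 h2))
      (by intro p _; simp [PySem.Dict.getD_empty])]
    rw [List.foldl_map]
    rfl
  -- phase 1 items
  have howners : ∀ k, ((((pvPairs dos).map Prod.swap).filter (fun p => p.1 == k)).map Prod.snd)
      = (((pvPairs dos).filter (fun q => q.2 == k)).map Prod.fst) := by
    intro k
    rw [List.filter_map, List.map_map]
    rfl
  have hitems : (pvInvertDictOfSets dos).items
      = (PySem.Set.ofList ((pvPairs dos).map Prod.snd)).map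
          (fun k => (k, (((pvPairs dos).filter (fun q => q.2 == k)).map Prod.fst))) := by
    rw [hsod, pvModifyFoldItems, List.map_map]
    have : (pvPairs dos).map (Prod.fst ∘ Prod.swap) = (pvPairs dos).map Prod.snd :=
      List.map_congr_left (fun a _ => rfl)
    rw [this]
    apply List.map_congr_left
    intro k _
    rw [howners k]
  -- phase 2
  unfold remove_duplicate_entries_py
  simp only [hitems]
  rw [PySem.List.foldl_if_eq_foldl_filter]
  rw [List.filter_map]
  have hcond : ∀ k ∈ PySem.Set.ofList ((pvPairs dos).map Prod.snd),
      ((fun (p : Int × PySem.Set Int) => PySem.Set.len p.2 == 1) ∘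
        (fun k => (k, (((pvPairs dos).filter (fun q => q.2 == k)).map Prod.fst)))) k
      = pvU dos k := by
    intro k _
    simp only [Function.comp_apply, PySem.Set.len, List.length_map, pvU,
      ← List.countP_eq_length_filter, List.count, List.countP_map]
    have hcast : ∀ (n : Nat), ((n : Int) == 1) = (n == 1) := by
      intro n
      by_cases h : n = 1 <;> simp [h]
    rw [hcast]
    rfl
  rw [List.filter_congr hcond]
  rw [pvFD _ _ (by intro x hx; simp only [pvU, beq_iff_eq] at hx; omega)]
  rw [← pvQ_map_snd]
  rw [List.foldl_map, List.foldl_map]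
  dsimp only
  have hfold := PySem.List.foldl_congr_mem
    (l := pvQ dos) (init := (PySem.Dict.empty : PySem.Dict Int (PySem.Set Int)))
    (f := fun x (y : Int × Int) =>
      x.insert ((((pvPairs dos).filter (fun q => q.2 == y.2)).map Prod.fst).headD 0)
        ((x.getD ((((pvPairs dos).filter (fun q => q.2 == y.2)).map Prod.fst).headD 0)
            PySem.Set.empty).union (PySem.Set.ofList [y.2])))
    (g := fun out p => out.insert p.1 (PySem.Set.add (out.getD p.1 []) p.2))
    (by intro out p hp
        dsimp only
        rw [pvOwnersSingleton dos p hp]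
        rfl)
  rw [hfold]
  rw [pvAddFold_eq_modifyFold _ _
      (by exact List.Pairwise.imp (fun {a b} h (_ : a.1 = b.1) => h) (List.pairwise_map.1 (pvQ_snd_nodup dos)))
      (by intro p _; simp [PySem.Dict.getD_empty])]
  rw [pvModifyFoldItems]

lemma pvOfListConst (c : Int) (l : List Int) :
    PySem.Set.ofList (l.map (fun _ => c)) = if l.isEmpty then [] else [c] := by
  induction l with
  | nil => rfl
  | cons x t ih =>
    rw [List.map_cons, PySem.Set.ofList_cons, ih]
    by_cases ht : t.isEmpty <;> simp [ht, PySem.Set.discard]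

-- grouping a stream of per-key blocks with distinct keys recovers the nonempty blocks
lemma pvBlocks (l : List (Int × List Int)) (hnd : (l.map Prod.fst).Nodup) :
    (PySem.Set.ofList ((pvPairs l).map Prod.fst)).map
        (fun d => (d, ((pvPairs l).filter (fun p => p.1 == d)).map Prod.snd))
      = l.filter (fun kv => !kv.2.isEmpty) := by
  induction l with
  | nil => rfl
  | cons kv t ih =>
    have h1 := hnd
    simp only [List.map_cons, List.nodup_cons] at h1
    have hpairs : pvPairs (kv :: t) = kv.2.map (fun i => (kv.1, i)) ++ pvPairs t := by
      simp [pvPairs]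
    have hkeysblock : (kv.2.map (fun i => (kv.1, i))).map Prod.fst = kv.2.map (fun _ => kv.1) := by
      rw [List.map_map]; rfl
    by_cases h2 : kv.2.isEmpty
    · have h2' : kv.2 = [] := by simpa using h2
      rw [hpairs, h2']
      simp only [List.map_nil, List.nil_append, List.filter_cons, h2']
      simpa using ih h1.2
    · have h2' : kv.2 ≠ [] := by simpa using h2
      rw [hpairs, List.map_append, hkeysblock, PySem.Set.ofList_append, pvOfListConst]
      rw [if_neg h2]
      have hupd : PySem.Set.update [kv.1] ((pvPairs t).map Prod.fst)
          = kv.1 :: PySem.Set.ofList ((pvPairs t).map Prod.fst) := by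
        rw [PySem.Set.update_eq_append_filter]
        have : (PySem.Set.ofList ((pvPairs t).map Prod.fst)).filter
            (fun y => !(PySem.Set.contains [kv.1] y)) = PySem.Set.ofList ((pvPairs t).map Prod.fst) := by
          apply List.filter_eq_self.2
          intro y hy
          have hyt : y ∈ (pvPairs t).map Prod.fst := (PySem.Set.mem_ofList _ _).1 hy
          have : y ∈ t.map Prod.fst := by
            obtain ⟨q, hq, rfl⟩ := List.mem_map.1 hyt
            exact pvFst_mem_pairs t q hq
          have hne : y ≠ kv.1 := by rintro rfl; exact h1.1 this
          simp [PySem.Set.contains, hne]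
        rw [this]; rfl
      rw [hupd, List.map_cons]
      -- head entry
      have hheadfilter : ((kv.2.map (fun i => (kv.1, i)) ++ pvPairs t).filter (fun p => p.1 == kv.1)).map Prod.snd
          = kv.2 := by
        rw [List.filter_append]
        have hb : (kv.2.map (fun i => (kv.1, i))).filter (fun p => p.1 == kv.1)
            = kv.2.map (fun i => (kv.1, i)) := by
          apply List.filter_eq_self.2
          intro p hp
          obtain ⟨i, _, rfl⟩ := List.mem_map.1 hp
          simp
        have ht : (pvPairs t).filter (fun p => p.1 == kv.1) = [] := by
          apply List.filter_eq_nil_iff.2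
          intro q hq
          have := pvFst_mem_pairs t q hq
          simp only [beq_iff_eq]
          intro hq1
          exact h1.1 (hq1 ▸ this)
        rw [hb, ht, List.append_nil, List.map_map]
        simp
      -- tail entries
      have htail : (PySem.Set.ofList ((pvPairs t).map Prod.fst)).map
          (fun d => (d, ((kv.2.map (fun i => (kv.1, i)) ++ pvPairs t).filter (fun p => p.1 == d)).map Prod.snd))
          = (PySem.Set.ofList ((pvPairs t).map Prod.fst)).map
          (fun d => (d, ((pvPairs t).filter (fun p => p.1 == d)).map Prod.snd)) := by
        apply List.map_congr_left
        intro d hd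
        have hdt : d ∈ t.map Prod.fst := by
          obtain ⟨q, hq, rfl⟩ := List.mem_map.1 ((PySem.Set.mem_ofList _ _).1 hd)
          exact pvFst_mem_pairs t q hq
        have hdk : kv.1 ≠ d := by rintro rfl; exact h1.1 hdt
        rw [List.filter_append]
        have hb : (kv.2.map (fun i => (kv.1, i))).filter (fun p => p.1 == d) = [] := by
          apply List.filter_eq_nil_iff.2
          intro p hp
          obtain ⟨i, _, rfl⟩ := List.mem_map.1 hp
          simpa using hdk
        rw [hb, List.nil_append]
      rw [hheadfilter, htail, ih h1.2]
      simp [h2]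

-- the (seen, shared) pass: membership characterization
lemma pvSharedSpec (l : List (Int × Int)) (seen shared : PySem.Set Int) (x : Int) :
    (x ∈ (l.foldl (fun (ss : PySem.Set Int × PySem.Set Int) p =>
        if PySem.Set.contains ss.1 p.2 then (ss.1, PySem.Set.add ss.2 p.2)
        else (PySem.Set.add ss.1 p.2, ss.2)) (seen, shared)).1
      ↔ x ∈ seen ∨ x ∈ l.map Prod.snd) ∧
    (x ∈ (l.foldl (fun (ss : PySem.Set Int × PySem.Set Int) p =>
        if PySem.Set.contains ss.1 p.2 then (ss.1, PySem.Set.add ss.2 p.2)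
        else (PySem.Set.add ss.1 p.2, ss.2)) (seen, shared)).2
      ↔ x ∈ shared ∨ (x ∈ seen ∧ x ∈ l.map Prod.snd) ∨ 2 ≤ (l.map Prod.snd).count x) := by
  induction l generalizing seen shared with
  | nil => simp
  | cons p t ih =>
    have hcnt : ((p :: t).map Prod.snd).count x
        = (t.map Prod.snd).count x + (if x = p.2 then 1 else 0) := by
      simp only [List.map_cons, List.count_cons]
      by_cases hx : x = p.2 <;> simp [hx, Ne.symm]
    have hmemc : x ∈ (p :: t).map Prod.snd ↔ (x = p.2 ∨ x ∈ t.map Prod.snd) := by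
      simp [eq_comm]
    have hM : x ∈ t.map Prod.snd ↔ 1 ≤ (t.map Prod.snd).count x :=
      ⟨fun h => List.count_pos_iff.2 h, fun h => List.count_pos_iff.1 h⟩
    by_cases hc : PySem.Set.contains seen p.2
    · have hmem : p.2 ∈ seen := (PySem.Set.contains_iff _ _).1 hc
      simp only [List.foldl_cons, if_pos hc]
      obtain ⟨ih1, ih2⟩ := ih seen (PySem.Set.add shared p.2)
      clear ih
      refine ⟨?_, ?_⟩
      · rw [ih1, hmemc]
        clear ih1 ih2
        by_cases hx : x = p.2
        · have hB : x ∈ seen := hx ▸ hmem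
          exact ⟨fun _ => Or.inl hB, fun _ => Or.inl hB⟩
        · tauto
      · rw [ih2, PySem.Set.mem_add, hmemc, hcnt]
        clear ih1 ih2
        by_cases hx : x = p.2
        · have hB : x ∈ seen := hx ▸ hmem
          exact ⟨fun _ => Or.inr (Or.inl ⟨hB, Or.inl hx⟩),
                 fun _ => Or.inl (Or.inr hx)⟩
        · rw [if_neg hx, Nat.add_zero]
          tauto
    · have hmem : p.2 ∉ seen := fun h => hc ((PySem.Set.contains_iff _ _).2 h)
      simp only [List.foldl_cons, if_neg hc]
      obtain ⟨ih1, ih2⟩ := ih (PySem.Set.add seen p.2) shared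
      clear ih
      refine ⟨?_, ?_⟩
      · rw [ih1, PySem.Set.mem_add, hmemc]
        clear ih1 ih2
        tauto
      · rw [ih2, PySem.Set.mem_add, hmemc, hcnt]
        clear ih1 ih2
        by_cases hx : x = p.2
        · have hB : x ∉ seen := hx ▸ hmem
          rw [if_pos hx]
          by_cases hm : x ∈ t.map Prod.snd
          · have h1 : 1 ≤ (t.map Prod.snd).count x := hM.1 hm
            have h2 : 2 ≤ (t.map Prod.snd).count x + 1 := by omega
            exact ⟨fun _ => Or.inr (Or.inr h2),
                   fun _ => Or.inr (Or.inl ⟨Or.inr hx, hm⟩)⟩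
          · have h0 : (t.map Prod.snd).count x = 0 := List.count_eq_zero.2 hm
            rw [h0]
            constructor
            · rintro (h | h | h)
              · exact Or.inl h
              · exact absurd h.2 hm
              · exact absurd h (by omega)
            · rintro (h | h | h)
              · exact Or.inl h
              · exact absurd h.1 hB
              · exact absurd h (by omega)
        · rw [if_neg hx, Nat.add_zero]
          tauto

-- B computes the per-entry filters of the original dict
lemma pvB_eq (dos : List (Int × List Int))
    (h1 : (dos.map Prod.fst).Nodup) (h2 : ∀ p ∈ dos, p.2.Nodup) :
    remove_duplicate_entries_py_alt dos
      = (dos.filter (fun kv => !(kv.2.filter (pvU dos)).isEmpty)).map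
          (fun kv => (kv.1, kv.2.filter (pvU dos))) := by
  unfold remove_duplicate_entries_py_alt
  dsimp only
  rw [pvFoldFlat dos (fun ss k i =>
    if PySem.Set.contains ss.1 i then (ss.1, PySem.Set.add ss.2 i)
    else (PySem.Set.add ss.1 i, ss.2)) (PySem.Set.empty, PySem.Set.empty)]
  set sh := ((pvPairs dos).foldl (fun (ss : PySem.Set Int × PySem.Set Int) p =>
      if PySem.Set.contains ss.1 p.2 then (ss.1, PySem.Set.add ss.2 p.2)
      else (PySem.Set.add ss.1 p.2, ss.2)) (PySem.Set.empty, PySem.Set.empty)).2 with hshdef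
  have hsh : ∀ x, x ∈ sh ↔ 2 ≤ ((pvPairs dos).map Prod.snd).count x := by
    intro x
    have := (pvSharedSpec (pvPairs dos) PySem.Set.empty PySem.Set.empty x).2
    rw [hshdef]
    rw [this]
    simp [PySem.Set.empty]
  -- replace the membership test by pvU, and re-orient the if
  have hstep : dos.foldl (fun (out : PySem.Dict Int (PySem.Set Int)) kv =>
        if (kv.2.filter (fun i => !(PySem.Set.contains sh i))).isEmpty then out
        else out.insert kv.1 (PySem.Set.ofList (kv.2.filter (fun i => !(PySem.Set.contains sh i))))) PySem.Dict.empty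
      = dos.foldl (fun (out : PySem.Dict Int (PySem.Set Int)) kv =>
        if !(kv.2.filter (pvU dos)).isEmpty then
          out.insert kv.1 (PySem.Set.ofList (kv.2.filter (pvU dos))) else out) PySem.Dict.empty := by
    apply PySem.List.foldl_congr_mem
    intro out kv hkv
    have hfilt : kv.2.filter (fun i => !(PySem.Set.contains sh i)) = kv.2.filter (pvU dos) := by
      apply List.filter_congr
      intro i hi
      have hmem : i ∈ (pvPairs dos).map Prod.snd := by
        apply List.mem_map.2
        exact ⟨(kv.1, i), by
          simp only [pvPairs, List.mem_flatMap]
          exact ⟨kv, hkv, List.mem_map.2 ⟨i, hi, rfl⟩⟩, rfl⟩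
      have hpos : 1 ≤ ((pvPairs dos).map Prod.snd).count i := List.count_pos_iff.2 hmem
      by_cases hc : 2 ≤ ((pvPairs dos).map Prod.snd).count i
      · have : PySem.Set.contains sh i = true := (PySem.Set.contains_iff _ _).2 ((hsh i).2 hc)
        have hu : pvU dos i = false := by
          simp only [pvU, beq_eq_false_iff_ne]
          omega
        rw [this, hu]
        rfl
      · have : PySem.Set.contains sh i = false := by
          rw [← Bool.not_eq_true]
          intro hcon
          exact hc ((hsh i).1 ((PySem.Set.contains_iff _ _).1 hcon))
        have hu : pvU dos i = true := by
          simp only [pvU, beq_iff_eq]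
          omega
        rw [this, hu]
        rfl
    simp only [hfilt]
    by_cases he : (kv.2.filter (pvU dos)).isEmpty <;> simp [he]
  rw [hstep]
  rw [PySem.List.foldl_if_eq_foldl_filter]
  have hfresh : ∀ kv ∈ dos.filter (fun kv => !(kv.2.filter (pvU dos)).isEmpty),
      (PySem.Dict.empty : PySem.Dict Int (PySem.Set Int)).contains kv.1 = false := by
    intro kv _
    exact PySem.Dict.contains_empty _
  have hnodup : ((dos.filter (fun kv => !(kv.2.filter (pvU dos)).isEmpty)).map Prod.fst).Nodup :=
    List.Nodup.sublist (List.Sublist.map Prod.fst (List.filter_sublist)) h1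
  rw [PySem.Dict.items_foldl_insert_fresh _ _ _ _ hfresh hnodup]
  show PySem.Dict.empty.items ++ _ = _
  rw [show (PySem.Dict.empty : PySem.Dict Int (PySem.Set Int)).items = [] from rfl, List.nil_append]
  apply List.map_congr_left
  intro kv hkv
  have : (kv.2.filter (pvU dos)).Nodup :=
    List.Nodup.filter _ (h2 kv (List.mem_of_mem_filter hkv))
  rw [PySem.Set.ofList_eq_self_of_nodup _ this]

lemma pvQ_flat (dos : List (Int × List Int)) :
    pvQ dos = pvPairs (dos.map (fun kv => (kv.1, kv.2.filter (pvU dos)))) := by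
  simp [pvQ, pvPairs, List.filter_flatMap, List.filter_map, List.flatMap_map]
  rfl

-- ===== VERDICT =====
theorem remove_duplicate_entries_py_spec : Claim_equal_remove_duplicate_entries_py := by
  intro dos _ hpre
  unfold Spec_remove_duplicate_entries_py
  rw [pvA_eq dos hpre.1 hpre.2, pvB_eq dos hpre.1 hpre.2, pvQ_flat]
  have hnd : ((dos.map (fun kv => (kv.1, kv.2.filter (pvU dos)))).map Prod.fst).Nodup := by
    simpa [List.map_map, Function.comp] using hpre.1
  rw [pvBlocks _ hnd]
  rw [List.filter_map]
  rfl
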